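-- pv_equiv track=rewrite | github.com/Google-DSC-SCH/2022-GDSCSCH-AlgorithmStudy | 07_이인규/문자열 나누기.py | solution
-- ===== SOURCE A (Python) =====
-- def solution(s):
--     dic = {'yes':0, 'no':0}; count = 0; key = 0
--     for i in range(len(s)):
--         if not key:
--             key = s[i]
--         if s[i] == key:
--             dic['yes'] += 1
--         else:
--             dic['no'] += 1
--         if dic['yes'] == dic['no']:
--             count += 1
--             dic['yes'] = 0
--             dic['no'] = 0
--             key = 0
--
--     if dic['yes']:
--         count += 1
--
--     return count
-- ===== SOURCE B (Python) =====
-- def solution(s):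
--     # Balanced segments always have even length, so balance (matches minus
--     # mismatches of the segment's first char) can only return to zero at even
--     # offsets: traverse the string two characters at a time.
--     count = 0
--     bal = 0
--     key = ''
--     for a, b in zip(s[::2], s[1::2]):
--         if bal == 0:
--             key = a
--         bal += (a == key) - (a != key) + (b == key) - (b != key)
--         if bal == 0:
--             count += 1
--     if bal != 0 or len(s) % 2 == 1:
--         count += 1
--     return count
-- ===== Notes on version B (the rewrite author's own statement) =====
-- stated objective: faster
-- what changed: Replaces A's one-character-at-a-time pass with yes/no dict counters and a falsy reset sentinel by a pair-stepping traversal over zip(s[::2], s[1::2]) with a single signed balance counter, exploiting the invariant that balanced segments always have even length so the balance only needs to be inspected at even offsets.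
import Mathlib
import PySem

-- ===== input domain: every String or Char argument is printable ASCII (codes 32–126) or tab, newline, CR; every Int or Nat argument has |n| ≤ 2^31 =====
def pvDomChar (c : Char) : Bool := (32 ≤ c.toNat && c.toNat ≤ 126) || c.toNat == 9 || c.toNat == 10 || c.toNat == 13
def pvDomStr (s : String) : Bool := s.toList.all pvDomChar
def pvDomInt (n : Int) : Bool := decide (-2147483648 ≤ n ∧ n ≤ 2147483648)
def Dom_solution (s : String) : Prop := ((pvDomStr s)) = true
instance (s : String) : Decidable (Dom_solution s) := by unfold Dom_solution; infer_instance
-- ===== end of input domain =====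

-- B replaces A's one-char-at-a-time pass with yes/no dict counters and a reset sentinel by a
-- pair-stepping traversal of zip(s[::2], s[1::2]) with a single signed balance counter,
-- using the invariant that balanced segments have even length; constant-factor faster (half the loop iterations, no dict).

-- ===== PORT A =====
-- A's flat for-loop; state: dic['yes'], dic['no'], count, key (none models Python's falsy 0 sentinel).
def solLoopA : List Char → Int → Int → Int → Option Char → Int
  | [], yes, _no, count, _key => count + (if yes ≠ 0 then 1 else 0)
  | c :: l, yes, no, count, key =>
      -- `if not key: key = s[i]`
      let key' : Char := match key with | none => c | some k => k
      if c = key' then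
        let yes' := yes + 1
        if yes' = no then solLoopA l 0 0 (count + 1) none
        else solLoopA l yes' no count (some key')
      else
        let no' := no + 1
        if yes = no' then solLoopA l 0 0 (count + 1) none
        else solLoopA l yes no' count (some key')

def solution (s : String) : Int := solLoopA s.toList 0 0 0 none

-- ===== PORT B =====
-- zip(s[::2], s[1::2]) : consecutive disjoint pairs (exact: the even- and odd-indexed
-- slices zipped elementwise give adjacent pairs, dropping a trailing odd char).
def solPairs : List Char → List (Char × Char)
  | a :: b :: l => (a, b) :: solPairs l
  | _ => []

-- Python bool arithmetic: (a == key) - (a != key) is +1 on a match, -1 otherwise.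
def solDelta (c key : Char) : Int := (if c = key then 1 else 0) - (if c = key then 0 else 1)

-- loop body over one pair; state (bal, key, count)
def solStepB (st : Int × Char × Int) (p : Char × Char) : Int × Char × Int :=
  let key := if st.1 = 0 then p.1 else st.2.1
  let bal := st.1 + solDelta p.1 key + solDelta p.2 key
  (bal, key, if bal = 0 then st.2.2 + 1 else st.2.2)

def solution_alt (s : String) : Int :=
  let l := s.toList
  let st := (solPairs l).foldl solStepB (0, ' ', 0)
  st.2.2 + (if st.1 ≠ 0 ∨ l.length % 2 = 1 then 1 else 0)

-- ===== PRECONDITION & SPEC =====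
def Spec_solution (s : String) (out : Int) : Prop := out = solution_alt s
instance (s : String) (out : Int) : Decidable (Spec_solution s out) := by unfold Spec_solution; infer_instance

-- ===== CLAIM (what is proved, stated in full; the proofs are below) =====
def Claim_equal_solution : Prop := ∀ (s : String), Dom_solution s → Spec_solution s (solution s)

-- ===== LEMMAS AND PROOFS =====

-- B's fold followed by the final `if`, as a function of the remaining chars and the state
def solRunB (l : List Char) (bal : Int) (key : Char) (count : Int) : Int :=
  let st := (solPairs l).foldl solStepB (bal, key, count)
  st.2.2 + (if st.1 ≠ 0 ∨ l.length % 2 = 1 then 1 else 0)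

theorem solRunB_nil (bal : Int) (key : Char) (count : Int) :
    solRunB [] bal key count = count + (if bal ≠ 0 then 1 else 0) := by
  simp [solRunB, solPairs]

theorem solRunB_single (c : Char) (bal : Int) (key : Char) (count : Int) :
    solRunB [c] bal key count = count + 1 := by
  simp [solRunB, solPairs]

theorem solRunB_cons (a b : Char) (l : List Char) (bal : Int) (key : Char) (count : Int) :
    solRunB (a :: b :: l) bal key count =
      solRunB l (bal + solDelta a (if bal = 0 then a else key) + solDelta b (if bal = 0 then a else key))
        (if bal = 0 then a else key)
        (if bal + solDelta a (if bal = 0 then a else key) + solDelta b (if bal = 0 then a else key) = 0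
          then count + 1 else count) := by
  have hlen : (a :: b :: l).length % 2 = l.length % 2 := by
    simp [List.length_cons]; omega
  simp only [solRunB, solPairs, List.foldl_cons, solStepB]
  rw [hlen]

theorem solRunB_cons_fresh (a b : Char) (l : List Char) (key : Char) (count : Int) :
    solRunB (a :: b :: l) 0 key count =
      solRunB l (solDelta a a + solDelta b a) a
        (if solDelta a a + solDelta b a = 0 then count + 1 else count) := by
  rw [solRunB_cons]
  norm_num

theorem solRunB_cons_mid (a b : Char) (l : List Char) (bal : Int) (key : Char) (count : Int)
    (h : bal ≠ 0) :
    solRunB (a :: b :: l) bal key count =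
      solRunB l (bal + solDelta a key + solDelta b key) key
        (if bal + solDelta a key + solDelta b key = 0 then count + 1 else count) := by
  rw [solRunB_cons, if_neg h]

theorem solDelta_self (c : Char) : solDelta c c = 1 := by simp [solDelta]

theorem solDelta_eq (c k : Char) (h : c = k) : solDelta c k = 1 := by simp [solDelta, h]

theorem solDelta_ne (c k : Char) (h : ¬ c = k) : solDelta c k = -1 := by simp [solDelta, h]

-- A's loop, one step from a fresh state: the char becomes the key and matches itself
theorem solLoopA_fresh_cons (c : Char) (l : List Char) (count : Int) :
    solLoopA (c :: l) 0 0 count none = solLoopA l 1 0 count (some c) := by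
  simp [solLoopA]

-- A's loop, one step from a mid-segment state
theorem solLoopA_mid_cons (c : Char) (l : List Char) (y m count : Int) (k : Char) :
    solLoopA (c :: l) y m count (some k) =
      if c = k then
        (if y + 1 = m then solLoopA l 0 0 (count + 1) none
         else solLoopA l (y + 1) m count (some k))
      else
        (if y = m + 1 then solLoopA l 0 0 (count + 1) none
         else solLoopA l y (m + 1) count (some k)) := by
  rfl

-- main invariant, strong induction on length, two chars at a time:
-- fresh A-state matches B with bal = 0; mid-segment A-state (yes >= 1, yes - no >= 1,
-- yes - no even, i.e. at a pair boundary) matches B with bal = yes - no.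
theorem sol_main (n : Nat) : ∀ l : List Char, l.length = n →
    (∀ (count : Int) (k : Char), solLoopA l 0 0 count none = solRunB l 0 k count) ∧
    (∀ (y m count : Int) (k : Char), 1 ≤ y → 1 ≤ y - m → (y - m) % 2 = 0 →
      solLoopA l y m count (some k) = solRunB l (y - m) k count) := by
  induction n using Nat.strong_induction_on with
  | _ n ih =>
    intro l hl
    constructor
    · intro count k
      match l with
      | [] => simp [solLoopA, solRunB_nil]
      | [c] => simp [solLoopA, solRunB_single]
      | a :: b :: l =>
          have hlen : l.length < n := by rw [← hl]; simp [List.length_cons]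
          rw [solLoopA_fresh_cons, solLoopA_mid_cons, solRunB_cons_fresh, solDelta_self]
          by_cases hb : b = a
          · rw [if_pos hb, if_neg (by norm_num : ¬ (1:Int) + 1 = 0), solDelta_eq b a hb,
              if_neg (by norm_num : ¬ (1:Int) + 1 = 0)]
            have h2 := (ih _ hlen l rfl).2 2 0 count a (by norm_num) (by norm_num) (by norm_num)
            simpa using h2
          · rw [if_neg hb, if_pos (by norm_num : (1:Int) = 0 + 1), solDelta_ne b a hb,
              if_pos (by norm_num : (1:Int) + -1 = 0)]
            have h1 := (ih _ hlen l rfl).1 (count + 1) k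
            rw [h1]
            have : (1:Int) + -1 = 0 := by norm_num
            rw [this]
            -- solRunB does not depend on the key when bal = 0 and l has < 2 chars,
            -- and when it has >= 2 the key is overwritten: prove by cases on l
            match l with
            | [] => rw [solRunB_nil, solRunB_nil]
            | [c] => rw [solRunB_single, solRunB_single]
            | x :: y :: l' => rw [solRunB_cons_fresh, solRunB_cons_fresh]
    · intro y m count k hy hge hpar
      have hbal : y - m ≠ 0 := by omega
      match l with
      | [] =>
          have hy0 : y ≠ 0 := by omega
          simp [solLoopA, solRunB_nil, hy0, hbal]
      | [c] =>
          rw [solLoopA_mid_cons, solRunB_single]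
          by_cases hc : c = k
          · rw [if_pos hc, if_neg (by omega : ¬ y + 1 = m)]
            have hy1 : y + 1 ≠ 0 := by omega
            simp [solLoopA, hy1]
          · rw [if_neg hc, if_neg (by omega : ¬ y = m + 1)]
            have hy1 : y ≠ 0 := by omega
            simp [solLoopA, hy1]
      | a :: b :: l =>
          have hlen : l.length < n := by rw [← hl]; simp [List.length_cons]
          rw [solLoopA_mid_cons, solRunB_cons_mid a b l _ k count hbal]
          by_cases ha : a = k
          · rw [if_pos ha, solDelta_eq a k ha, if_neg (by omega : ¬ y + 1 = m),
              solLoopA_mid_cons]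
            by_cases hb : b = k
            · rw [if_pos hb, solDelta_eq b k hb, if_neg (by omega : ¬ y + 1 + 1 = m),
                if_neg (by omega : ¬ y - m + 1 + 1 = 0)]
              have h2 := (ih _ hlen l rfl).2 (y + 1 + 1) m count k (by omega) (by omega) (by omega)
              have he : y + 1 + 1 - m = y - m + 1 + 1 := by ring
              rw [he] at h2; exact h2
            · rw [if_neg hb, solDelta_ne b k hb]
              by_cases hz : y + 1 = m + 1
              · rw [if_pos hz, if_pos (by omega : y - m + 1 + -1 = 0),
                  (by omega : y - m + 1 + -1 = 0)]
                exact (ih _ hlen l rfl).1 (count + 1) k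
              · rw [if_neg hz, if_neg (by omega : ¬ y - m + 1 + -1 = 0)]
                have h2 := (ih _ hlen l rfl).2 (y + 1) (m + 1) count k (by omega) (by omega) (by omega)
                have he : y + 1 - (m + 1) = y - m + 1 + -1 := by ring
                rw [he] at h2; exact h2
          · rw [if_neg ha, solDelta_ne a k ha, if_neg (by omega : ¬ y = m + 1),
              solLoopA_mid_cons]
            by_cases hb : b = k
            · rw [if_pos hb, solDelta_eq b k hb, if_neg (by omega : ¬ y + 1 = m + 1),
                if_neg (by omega : ¬ y - m + -1 + 1 = 0)]
              have h2 := (ih _ hlen l rfl).2 (y + 1) (m + 1) count k (by omega) (by omega) (by omega)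
              have he : y + 1 - (m + 1) = y - m + -1 + 1 := by ring
              rw [he] at h2; exact h2
            · rw [if_neg hb, solDelta_ne b k hb]
              by_cases hz : y = m + 1 + 1
              · rw [if_pos hz, if_pos (by omega : y - m + -1 + -1 = 0),
                  (by omega : y - m + -1 + -1 = 0)]
                exact (ih _ hlen l rfl).1 (count + 1) k
              · rw [if_neg hz, if_neg (by omega : ¬ y - m + -1 + -1 = 0)]
                have h2 := (ih _ hlen l rfl).2 y (m + 1 + 1) count k (by omega) (by omega) (by omega)
                have he : y - (m + 1 + 1) = y - m + -1 + -1 := by ring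
                rw [he] at h2; exact h2

-- ===== VERDICT (by name: the statement is the Claim_ definition above) =====
theorem solution_spec : Claim_equal_solution := by
  intro s _
  unfold Spec_solution solution solution_alt
  have h := (sol_main s.toList.length s.toList rfl).1 0 ' '
  rw [h]
  rfl
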